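-- pv_equiv track=rewrite | github.com/NicholasKobald/snake2017-2018 | app/food_fetcher.py | prioritize_valid_moves
-- ===== SOURCE A (Python) =====
-- def prioritize_valid_moves(valid_moves, to_big_clusters, to_near_clusters, to_close_food):
--     # create buckets for every 'tier' of move priority (where 0 is the highest priority)
--     priority_buckets = [[], [], [], []]
--     priority_val_per_move = dict()
--     for move in valid_moves:
--         pop_count = 0
--         if move in to_big_clusters:
--             pop_count += 1
--         if move in to_near_clusters:
--             pop_count += 1
--         if move in to_close_food:
--             pop_count += 1
--
--         priority_val_per_move[move] = pop_count
--         priority_index = (pop_count * (-1)) - 1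
--         priority_buckets[priority_index].append(move)
--
--     # that's it, done.
--     prioritized = sum(priority_buckets, [])
--     return prioritized, priority_val_per_move
-- ===== SOURCE B (Python) =====
-- def prioritize_valid_moves(valid_moves, to_big_clusters, to_near_clusters, to_close_food):
--     big, near, close = set(to_big_clusters), set(to_near_clusters), set(to_close_food)
--     priority_val_per_move = {}
--     for move in valid_moves:
--         priority_val_per_move[move] = (move in big) + (move in near) + (move in close)
--     prioritized = sorted(valid_moves, key=lambda m: -priority_val_per_move[m])
--     return prioritized, priority_val_per_move
-- ===== Notes on version B (the rewrite author's own statement) =====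
-- stated objective: faster
-- what changed: Replaced the four explicit priority buckets filled via negative-index arithmetic (and concatenated with sum) by one stable sort of valid_moves on the negated priority count, with the three tier lists converted to sets so each membership test is O(1) instead of a list scan.
import Mathlib
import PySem

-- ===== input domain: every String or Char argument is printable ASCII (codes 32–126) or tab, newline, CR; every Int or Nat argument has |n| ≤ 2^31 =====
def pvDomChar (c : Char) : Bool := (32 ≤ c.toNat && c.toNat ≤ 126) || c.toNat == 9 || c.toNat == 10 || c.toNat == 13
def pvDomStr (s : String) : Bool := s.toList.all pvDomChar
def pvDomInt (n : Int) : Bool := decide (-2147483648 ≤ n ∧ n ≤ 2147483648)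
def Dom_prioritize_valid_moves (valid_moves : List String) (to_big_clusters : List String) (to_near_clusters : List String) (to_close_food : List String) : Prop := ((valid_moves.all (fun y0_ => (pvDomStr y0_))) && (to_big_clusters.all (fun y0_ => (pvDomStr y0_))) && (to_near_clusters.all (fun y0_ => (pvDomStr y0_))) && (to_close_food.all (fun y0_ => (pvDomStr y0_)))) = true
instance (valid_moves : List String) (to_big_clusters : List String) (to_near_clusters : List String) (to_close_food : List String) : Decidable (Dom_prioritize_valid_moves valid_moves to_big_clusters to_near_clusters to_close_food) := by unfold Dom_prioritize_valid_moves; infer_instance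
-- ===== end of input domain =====

-- B replaces A's four explicit priority buckets and negative-index arithmetic by a single
-- stable sort on the negated priority count, with the three tier lists turned into sets for lookup.

-- ===== PORT A =====
def prioritize_valid_moves (valid_moves : List String) (to_big_clusters : List String) (to_near_clusters : List String) (to_close_food : List String) : List String × (List (String × Int)) :=
  let fin := valid_moves.foldl (fun (st : List (List String) × PySem.Dict String Int) (move : String) =>
    let pop_count : Int := 0
    let pop_count := if to_big_clusters.contains move then pop_count + 1 else pop_count
    let pop_count := if to_near_clusters.contains move then pop_count + 1 else pop_count
    let pop_count := if to_close_food.contains move then pop_count + 1 else pop_count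
    let priority_index := pop_count * (-1) - 1
    -- priority_buckets[priority_index].append(move)  (negative index into the 4 buckets)
    (PySem.List.pySetD st.1 priority_index (PySem.List.pyGetD st.1 priority_index [] ++ [move]),
     st.2.insert move pop_count))
    ([[], [], [], []], PySem.Dict.empty)
  -- sum(priority_buckets, [])
  (fin.1.foldl (fun a b => a ++ b) [], fin.2.items)

-- ===== PORT B =====
def prioritize_valid_moves_alt (valid_moves : List String) (to_big_clusters : List String) (to_near_clusters : List String) (to_close_food : List String) : List String × (List (String × Int)) :=
  let big := PySem.Set.ofList to_big_clusters
  let near := PySem.Set.ofList to_near_clusters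
  let close := PySem.Set.ofList to_close_food
  let d := valid_moves.foldl (fun (d : PySem.Dict String Int) (move : String) =>
    d.insert move ((if big.contains move then (1 : Int) else 0) +
                   (if near.contains move then 1 else 0) +
                   (if close.contains move then 1 else 0))) PySem.Dict.empty
  -- sorted(valid_moves, key=lambda m: -d[m]); every m in valid_moves is a key of d, so d[m] = getD m 0 exactly
  (PySem.List.sorted valid_moves (fun m => -(d.getD m 0)) false, d.items)

-- ===== PRECONDITION & SPEC =====
def Spec_prioritize_valid_moves (valid_moves : List String) (to_big_clusters : List String) (to_near_clusters : List String) (to_close_food : List String) (out : List String × (List (String × Int))) : Prop := out = prioritize_valid_moves_alt valid_moves to_big_clusters to_near_clusters to_close_food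
instance (valid_moves : List String) (to_big_clusters : List String) (to_near_clusters : List String) (to_close_food : List String) (out : List String × (List (String × Int))) : Decidable (Spec_prioritize_valid_moves valid_moves to_big_clusters to_near_clusters to_close_food out) := by unfold Spec_prioritize_valid_moves; infer_instance

-- ===== CLAIM (what is proved, stated in full; the proofs are below) =====
def Claim_equal_prioritize_valid_moves : Prop := ∀ (valid_moves : List String) (to_big_clusters : List String) (to_near_clusters : List String) (to_close_food : List String), Dom_prioritize_valid_moves valid_moves to_big_clusters to_near_clusters to_close_food → Spec_prioritize_valid_moves valid_moves to_big_clusters to_near_clusters to_close_food (prioritize_valid_moves valid_moves to_big_clusters to_near_clusters to_close_food)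

-- ===== LEMMAS AND PROOFS =====

-- the priority count of a move, the canonical per-tier filters, and A's loop step
def pvCnt (tb tn tc : List String) (m : String) : Int :=
  (if tb.contains m then 1 else 0) + (if tn.contains m then 1 else 0) + (if tc.contains m then 1 else 0)

def pvF (c : String → Int) (j : Int) (l : List String) : List String := l.filter (fun x => c x == j)

def pvStepA (tb tn tc : List String) (st : List (List String) × PySem.Dict String Int) (move : String) : List (List String) × PySem.Dict String Int :=
  (PySem.List.pySetD st.1 (pvCnt tb tn tc move * (-1) - 1)
     (PySem.List.pyGetD st.1 (pvCnt tb tn tc move * (-1) - 1) [] ++ [move]),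
   st.2.insert move (pvCnt tb tn tc move))

lemma pvCnt_cases (tb tn tc : List String) (m : String) :
    pvCnt tb tn tc m = 0 ∨ pvCnt tb tn tc m = 1 ∨ pvCnt tb tn tc m = 2 ∨ pvCnt tb tn tc m = 3 := by
  unfold pvCnt; split_ifs <;> norm_num

-- the count dict: its value at any key of the list is the count of that key
lemma pvGetD_foldl_insert (c : String → Int) (l : List String) (d0 : PySem.Dict String Int) (x : String) :
    (l.foldl (fun d m => d.insert m (c m)) d0).getD x 0 = if x ∈ l then c x else d0.getD x 0 := by
  induction l generalizing d0 with
  | nil => simp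
  | cons m t ih =>
    simp only [List.foldl_cons, ih, PySem.Dict.getD_insert, List.mem_cons]
    by_cases hxt : x ∈ t <;> by_cases hxm : x = m <;> simp [hxt, hxm]

lemma pvInsertBy_append_left {α : Type} (before : α → α → Bool) (x : α) (ys zs : List α)
    (h : ∀ y ∈ ys, before x y = false) :
    PySem.List.insertBy before x (ys ++ zs) = ys ++ PySem.List.insertBy before x zs := by
  induction ys with
  | nil => simp
  | cons y t ih =>
    have hy := h y (by simp)
    simp [PySem.List.insertBy, hy, ih (fun y hy => h y (by simp [hy]))]

lemma pvInsertBy_all_before {α : Type} (before : α → α → Bool) (x : α) (zs : List α)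
    (h : ∀ z ∈ zs, before x z = true) :
    PySem.List.insertBy before x zs = x :: zs := by
  cases zs with
  | nil => simp [PySem.List.insertBy]
  | cons z t => simp [PySem.List.insertBy, h z (by simp)]

lemma pvTierApp (k : String → Int) (c : Int) (A : List String) (x : String)
    (hA : ∀ y ∈ A, k y = c) (hx : k x = c) : ∀ y ∈ A ++ [x], k y = c := by
  intro y hy
  rcases List.mem_append.1 hy with hy | hy
  · exact hA y hy
  · simp at hy; simp [hy, hx]

-- the stable insertion sort with a key taking values in {-3,-2,-1,0} is the tier concatenation
lemma pvFoldl_insertBy_tiers (k : String → Int) (l : List String) : ∀ (A3 A2 A1 A0 : List String),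
    (∀ x ∈ l, k x = -3 ∨ k x = -2 ∨ k x = -1 ∨ k x = 0) →
    (∀ y ∈ A3, k y = -3) → (∀ y ∈ A2, k y = -2) →
    (∀ y ∈ A1, k y = -1) → (∀ y ∈ A0, k y = 0) →
    l.foldl (fun acc x => PySem.List.insertBy (fun a b => decide (k a < k b)) x acc)
      (A3 ++ (A2 ++ (A1 ++ A0)))
    = (A3 ++ pvF k (-3) l) ++ ((A2 ++ pvF k (-2) l) ++ ((A1 ++ pvF k (-1) l) ++ (A0 ++ pvF k 0 l))) := by
  induction l with
  | nil => intro A3 A2 A1 A0 _ _ _ _ _; simp [pvF]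
  | cons x t ih =>
    intro A3 A2 A1 A0 hl h3 h2 h1 h0
    have hx := hl x (by simp)
    have ht : ∀ y ∈ t, k y = -3 ∨ k y = -2 ∨ k y = -1 ∨ k y = 0 := fun y hy => hl y (by simp [hy])
    simp only [List.foldl_cons]
    rcases hx with hx | hx | hx | hx
    · have hins : PySem.List.insertBy (fun a b => decide (k a < k b)) x (A3 ++ (A2 ++ (A1 ++ A0)))
          = (A3 ++ [x]) ++ (A2 ++ (A1 ++ A0)) := by
        rw [pvInsertBy_append_left _ _ _ _ (by intro y hy; simp [hx, h3 y hy])]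
        cases h : A2 ++ (A1 ++ A0) with
        | nil => simp [PySem.List.insertBy]
        | cons z zs =>
          rw [pvInsertBy_all_before]
          · simp
          · intro z hz
            simp only [← h, List.mem_append] at hz
            rcases hz with hz | hz | hz
            · simp [hx, h2 z hz]
            · simp [hx, h1 z hz]
            · simp [hx, h0 z hz]
      rw [hins, ih (A3 ++ [x]) A2 A1 A0 ht (pvTierApp k _ A3 x h3 hx) h2 h1 h0]
      simp [pvF, hx, List.append_assoc]
    · have hins : PySem.List.insertBy (fun a b => decide (k a < k b)) x (A3 ++ (A2 ++ (A1 ++ A0)))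
          = A3 ++ ((A2 ++ [x]) ++ (A1 ++ A0)) := by
        rw [pvInsertBy_append_left _ _ _ _ (by intro y hy; simp [hx, h3 y hy])]
        rw [pvInsertBy_append_left _ _ _ _ (by intro y hy; simp [hx, h2 y hy])]
        cases h : A1 ++ A0 with
        | nil => simp [PySem.List.insertBy]
        | cons z zs =>
          rw [pvInsertBy_all_before]
          · simp
          · intro z hz
            simp only [← h, List.mem_append] at hz
            rcases hz with hz | hz
            · simp [hx, h1 z hz]
            · simp [hx, h0 z hz]
      rw [hins]
      rw [ih A3 (A2 ++ [x]) A1 A0 ht h3 (pvTierApp k _ A2 x h2 hx) h1 h0]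
      simp [pvF, hx, List.append_assoc]
    · have hins : PySem.List.insertBy (fun a b => decide (k a < k b)) x (A3 ++ (A2 ++ (A1 ++ A0)))
          = A3 ++ (A2 ++ ((A1 ++ [x]) ++ A0)) := by
        rw [pvInsertBy_append_left _ _ _ _ (by intro y hy; simp [hx, h3 y hy])]
        rw [pvInsertBy_append_left _ _ _ _ (by intro y hy; simp [hx, h2 y hy])]
        rw [pvInsertBy_append_left _ _ _ _ (by intro y hy; simp [hx, h1 y hy])]
        cases h : A0 with
        | nil => simp [PySem.List.insertBy]
        | cons z zs =>
          rw [pvInsertBy_all_before]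
          · simp
          · intro z hz
            rw [← h] at hz
            simp [hx, h0 z hz]
      rw [hins]
      rw [ih A3 A2 (A1 ++ [x]) A0 ht h3 h2 (pvTierApp k _ A1 x h1 hx) h0]
      simp [pvF, hx, List.append_assoc]
    · have hins : PySem.List.insertBy (fun a b => decide (k a < k b)) x (A3 ++ (A2 ++ (A1 ++ A0)))
          = A3 ++ (A2 ++ (A1 ++ (A0 ++ [x]))) := by
        rw [pvInsertBy_append_left _ _ _ _ (by intro y hy; simp [hx, h3 y hy])]
        rw [pvInsertBy_append_left _ _ _ _ (by intro y hy; simp [hx, h2 y hy])]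
        rw [pvInsertBy_append_left _ _ _ _ (by intro y hy; simp [hx, h1 y hy])]
        rw [PySem.List.insertBy_of_forall_not_before _ _ _ (by intro y hy; simp [hx, h0 y hy])]
      rw [hins]
      rw [ih A3 A2 A1 (A0 ++ [x]) ht h3 h2 h1 (pvTierApp k _ A0 x h0 hx)]
      simp [pvF, hx, List.append_assoc]

lemma pvSorted_tiers (k : String → Int) (l : List String)
    (hl : ∀ x ∈ l, k x = -3 ∨ k x = -2 ∨ k x = -1 ∨ k x = 0) :
    PySem.List.sorted l k false = pvF k (-3) l ++ (pvF k (-2) l ++ (pvF k (-1) l ++ pvF k 0 l)) := by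
  have := pvFoldl_insertBy_tiers k l [] [] [] [] hl (by simp) (by simp) (by simp) (by simp)
  simpa [PySem.List.sorted_eq_foldl_insertBy] using this

-- A's bucket loop computes the four tier filters and the count dict
lemma pvFoldA (tb tn tc : List String) (l : List String) : ∀ (B3 B2 B1 B0 : List String) (d : PySem.Dict String Int),
    l.foldl (pvStepA tb tn tc) ([B3, B2, B1, B0], d)
    = ([B3 ++ pvF (pvCnt tb tn tc) 3 l, B2 ++ pvF (pvCnt tb tn tc) 2 l,
        B1 ++ pvF (pvCnt tb tn tc) 1 l, B0 ++ pvF (pvCnt tb tn tc) 0 l],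
       l.foldl (fun d m => d.insert m (pvCnt tb tn tc m)) d) := by
  induction l with
  | nil => intro B3 B2 B1 B0 d; simp [pvF]
  | cons x t ih =>
    intro B3 B2 B1 B0 d
    simp only [List.foldl_cons]
    rcases pvCnt_cases tb tn tc x with hx | hx | hx | hx
    · have hstep : pvStepA tb tn tc ([B3, B2, B1, B0], d) x = ([B3, B2, B1, B0 ++ [x]], d.insert x (pvCnt tb tn tc x)) := by
        simp [pvStepA, hx, PySem.List.pySetD, PySem.List.pySet?, PySem.List.pyIdx?, PySem.List.pyGetD, PySem.List.pyGet?]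
      rw [hstep, ih]
      simp [pvF, hx, List.append_assoc]
    · have hstep : pvStepA tb tn tc ([B3, B2, B1, B0], d) x = ([B3, B2, B1 ++ [x], B0], d.insert x (pvCnt tb tn tc x)) := by
        simp [pvStepA, hx, PySem.List.pySetD, PySem.List.pySet?, PySem.List.pyIdx?, PySem.List.pyGetD, PySem.List.pyGet?]
      rw [hstep, ih]
      simp [pvF, hx, List.append_assoc]
    · have hstep : pvStepA tb tn tc ([B3, B2, B1, B0], d) x = ([B3, B2 ++ [x], B1, B0], d.insert x (pvCnt tb tn tc x)) := by
        simp [pvStepA, hx, PySem.List.pySetD, PySem.List.pySet?, PySem.List.pyIdx?, PySem.List.pyGetD, PySem.List.pyGet?]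
      rw [hstep, ih]
      simp [pvF, hx, List.append_assoc]
    · have hstep : pvStepA tb tn tc ([B3, B2, B1, B0], d) x = ([B3 ++ [x], B2, B1, B0], d.insert x (pvCnt tb tn tc x)) := by
        simp [pvStepA, hx, PySem.List.pySetD, PySem.List.pySet?, PySem.List.pyIdx?, PySem.List.pyGetD, PySem.List.pyGet?]
      rw [hstep, ih]
      simp [pvF, hx, List.append_assoc]

-- ===== VERDICT (by name: the statement is the Claim_ definition above) =====
theorem prioritize_valid_moves_spec : Claim_equal_prioritize_valid_moves := by
  intro vm tb tn tc _
  unfold Spec_prioritize_valid_moves prioritize_valid_moves prioritize_valid_moves_alt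
  have hA : (fun (st : List (List String) × PySem.Dict String Int) (move : String) =>
      let pop_count : Int := 0
      let pop_count := if tb.contains move then pop_count + 1 else pop_count
      let pop_count := if tn.contains move then pop_count + 1 else pop_count
      let pop_count := if tc.contains move then pop_count + 1 else pop_count
      let priority_index := pop_count * (-1) - 1
      (PySem.List.pySetD st.1 priority_index (PySem.List.pyGetD st.1 priority_index [] ++ [move]),
       st.2.insert move pop_count)) = pvStepA tb tn tc := by
    funext st move
    simp only [pvStepA, pvCnt]
    split_ifs <;> norm_num
  have hD : vm.foldl (fun (d : PySem.Dict String Int) (move : String) =>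
      d.insert move ((if (PySem.Set.ofList tb).contains move then (1 : Int) else 0) +
                     (if (PySem.Set.ofList tn).contains move then 1 else 0) +
                     (if (PySem.Set.ofList tc).contains move then 1 else 0))) PySem.Dict.empty
      = vm.foldl (fun d m => d.insert m (pvCnt tb tn tc m)) PySem.Dict.empty := by
    apply List.foldl_ext
    intro d m _
    simp [pvCnt]
  simp only [hA, hD, pvFoldA]
  set D := vm.foldl (fun d m => d.insert m (pvCnt tb tn tc m)) PySem.Dict.empty with hDdef
  have hget : ∀ m ∈ vm, D.getD m 0 = pvCnt tb tn tc m := by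
    intro m hm
    rw [hDdef, pvGetD_foldl_insert]
    simp [hm]
  have hsort := pvSorted_tiers (fun m => -(D.getD m 0)) vm (by
    intro x hx
    dsimp only
    have h1 := hget x hx
    rcases pvCnt_cases tb tn tc x with h | h | h | h <;> omega)
  rw [hsort]
  have hc3 : pvF (fun m => -(D.getD m 0)) (-3) vm = pvF (pvCnt tb tn tc) 3 vm := by
    unfold pvF
    apply List.filter_congr
    intro x hx
    dsimp only
    rw [hget x hx]
    rcases pvCnt_cases tb tn tc x with h | h | h | h <;> rw [h] <;> decide
  have hc2 : pvF (fun m => -(D.getD m 0)) (-2) vm = pvF (pvCnt tb tn tc) 2 vm := by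
    unfold pvF
    apply List.filter_congr
    intro x hx
    dsimp only
    rw [hget x hx]
    rcases pvCnt_cases tb tn tc x with h | h | h | h <;> rw [h] <;> decide
  have hc1 : pvF (fun m => -(D.getD m 0)) (-1) vm = pvF (pvCnt tb tn tc) 1 vm := by
    unfold pvF
    apply List.filter_congr
    intro x hx
    dsimp only
    rw [hget x hx]
    rcases pvCnt_cases tb tn tc x with h | h | h | h <;> rw [h] <;> decide
  have hc0 : pvF (fun m => -(D.getD m 0)) 0 vm = pvF (pvCnt tb tn tc) 0 vm := by
    unfold pvF
    apply List.filter_congr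
    intro x hx
    dsimp only
    rw [hget x hx]
    rcases pvCnt_cases tb tn tc x with h | h | h | h <;> rw [h] <;> decide
  rw [hc3, hc2, hc1, hc0]
  simp [List.append_assoc]
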